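-- pv_equiv track=rewrite | github.com/raeez/chiral-bar-cobar | compute/lib/theorem_langlands_fle_bridge_engine.py | _subsets_of_size
-- ===== SOURCE A (Python) =====
-- from typing import Any, Dict, List, Optional, Tuple, Union
--
-- def _subsets_of_size(items: List[int], k: int) -> List[Tuple[int, ...]]:
--     """All k-element subsets of items."""
--     if k == 0:
--         return [()]
--     if not items or k > len(items):
--         return []
--     first = items[0]
--     rest = items[1:]
--     # Subsets including first
--     with_first = [(first,) + s for s in _subsets_of_size(rest, k - 1)]
--     # Subsets not including first
--     without_first = _subsets_of_size(rest, k)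
--     return with_first + without_first
-- ===== SOURCE B (Python) =====
-- from typing import List, Tuple
--
-- def _subsets_of_size(items: List[int], k: int) -> List[Tuple[int, ...]]:
--     """All k-element subsets of items, by a bottom-up DP over suffixes:
--     dp[j] holds the j-subsets of the suffix processed so far."""
--     if k < 0 or k > len(items):
--         return []
--     dp = [[()]] + [[] for _ in range(k)]
--     for x in reversed(items):
--         dp = [dp[0]] + [[(x,) + s for s in dp[j - 1]] + dp[j] for j in range(1, k + 1)]
--     return dp[k]
-- ===== Notes on version B (the rewrite author's own statement) =====
-- stated objective: alternative
-- what changed: Replaces A's branching head/tail recursion (include-first ++ exclude-first) by a bottom-up dynamic-programming table dp[j] = j-subsets of the current suffix, updated in one right-to-left pass over the items.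
import Mathlib
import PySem

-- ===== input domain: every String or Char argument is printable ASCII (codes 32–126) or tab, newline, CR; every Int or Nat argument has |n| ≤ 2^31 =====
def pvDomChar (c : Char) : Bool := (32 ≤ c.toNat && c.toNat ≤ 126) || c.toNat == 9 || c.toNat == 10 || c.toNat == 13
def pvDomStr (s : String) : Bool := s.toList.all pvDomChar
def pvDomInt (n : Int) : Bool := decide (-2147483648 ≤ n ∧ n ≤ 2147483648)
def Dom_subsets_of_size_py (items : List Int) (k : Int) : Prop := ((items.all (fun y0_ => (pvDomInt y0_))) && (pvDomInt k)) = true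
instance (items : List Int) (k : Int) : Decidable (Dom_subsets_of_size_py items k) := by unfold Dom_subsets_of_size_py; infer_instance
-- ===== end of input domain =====

-- B replaces A's head/tail double recursion by a single right-to-left fold maintaining a
-- DP table dp[j] = j-subsets of the current suffix (objective: alternative algorithm).

-- ===== PORT A =====
-- literal transliteration of A's recursion
def subsets_of_size_py (items : List Int) (k : Int) : List (List Int) :=
  if k = 0 then [[]]
  else
    match items with
    | [] => []                                  -- "not items" branch
    | first :: rest =>
      if k > (Int.ofNat (first :: rest).length) then []   -- "k > len(items)" branch
      else ((subsets_of_size_py rest (k - 1)).map (fun s => first :: s))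
            ++ subsets_of_size_py rest k

-- ===== PORT B =====
-- one row update of Source B's loop body: dp = [dp[0]] + [map (x::) dp[j-1] ++ dp[j], j = 1..k];
-- the comprehension pairs consecutive entries (dp[j-1], dp[j]), rendered as zipWith dp dp.tail
def pvStep (x : Int) (dp : List (List (List Int))) : List (List (List Int)) :=
  match dp with
  | [] => []
  | d0 :: rest =>
    d0 :: List.zipWith (fun prev cur => prev.map (fun s => x :: s) ++ cur) (d0 :: rest) rest

def subsets_of_size_py_alt (items : List Int) (k : Int) : List (List Int) :=
  if k < 0 ∨ k > (Int.ofNat items.length) then []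
  else
    let kn := k.toNat
    let dp0 : List (List (List Int)) := [[]] :: (List.range kn).map (fun _ => [])
    let dp := items.foldr pvStep dp0      -- "for x in reversed(items)"
    dp.getD kn []

-- ===== PRECONDITION & SPEC =====
def Spec_subsets_of_size_py (items : List Int) (k : Int) (out : List (List Int)) : Prop := out = subsets_of_size_py_alt items k
instance (items : List Int) (k : Int) (out : List (List Int)) : Decidable (Spec_subsets_of_size_py items k out) := by unfold Spec_subsets_of_size_py; infer_instance

-- ===== CLAIM (what is proved, stated in full; the proofs are below) =====
def Claim_equal_subsets_of_size_py : Prop := ∀ (items : List Int) (k : Int), Dom_subsets_of_size_py items k → Spec_subsets_of_size_py items k (subsets_of_size_py items k)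

-- ===== LEMMAS AND PROOFS =====

-- the mathematical k-subsets list both programs compute
def pvComb : List Int → Nat → List (List Int)
  | _, 0 => [[]]
  | [], _ + 1 => []
  | x :: r, j + 1 => ((pvComb r j).map (fun s => x :: s)) ++ pvComb r (j + 1)

theorem pvComb_zero (l : List Int) : pvComb l 0 = [[]] := by cases l <;> rfl

theorem pvComb_nil_of_gt : ∀ (l : List Int) (j : Nat), l.length < j → pvComb l j = [] := by
  intro l
  induction l with
  | nil =>
    intro j h
    cases j with
    | zero => omega
    | succ j => rfl
  | cons x r ih =>
    intro j h
    cases j with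
    | zero => omega
    | succ j =>
      simp only [pvComb]
      rw [ih j (by simpa using h), ih (j + 1) (by simp at h; omega)]
      rfl

theorem A_neg : ∀ (l : List Int) (k : Int), k < 0 → subsets_of_size_py l k = [] := by
  intro l
  induction l with
  | nil =>
    intro k hk
    rw [subsets_of_size_py, if_neg (show ¬ k = 0 by omega)]
  | cons x r ih =>
    intro k hk
    rw [subsets_of_size_py]
    rw [if_neg (by omega : ¬ k = 0)]
    rw [if_neg (by simp; omega)]
    rw [ih (k - 1) (by omega), ih k hk]
    rfl

theorem A_eq_comb : ∀ (l : List Int) (k : Int), 0 ≤ k → subsets_of_size_py l k = pvComb l k.toNat := by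
  intro l
  induction l with
  | nil =>
    intro k hk
    by_cases h0 : k = 0
    · subst h0; rfl
    · rw [subsets_of_size_py, if_neg h0]
      have : k.toNat = (k.toNat - 1) + 1 := by omega
      rw [this]; rfl
  | cons x r ih =>
    intro k hk
    by_cases h0 : k = 0
    · subst h0; rfl
    · rw [subsets_of_size_py, if_neg h0]
      have hk1 : 1 ≤ k := by omega
      have htn : k.toNat = (k - 1).toNat + 1 := by omega
      by_cases hlen : k > (Int.ofNat (x :: r).length)
      · rw [if_pos hlen]
        rw [pvComb_nil_of_gt (x :: r) k.toNat (by simp at hlen ⊢; omega)]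
      · rw [if_neg hlen]
        rw [ih (k - 1) (by omega), ih k hk, htn]
        rfl

-- one pvStep maps the row of pvComb-values for l to the row for x :: l
theorem pvStep_zip : ∀ (n j : Nat) (l : List Int) (x : Int),
    List.zipWith (fun prev cur => prev.map (fun s => x :: s) ++ cur)
      ((List.range' j (n + 1)).map (pvComb l)) ((List.range' (j + 1) n).map (pvComb l))
      = (List.range' (j + 1) n).map (pvComb (x :: l)) := by
  intro n
  induction n with
  | zero => intro j l x; rfl
  | succ n ih =>
    intro j l x
    have h1 : List.range' j (n + 1 + 1) = j :: List.range' (j + 1) (n + 1) := by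
      simp [List.range'_succ]
    have h2 : List.range' (j + 1) (n + 1) = (j + 1) :: List.range' (j + 2) n := by
      simp [List.range'_succ]
    rw [h1, h2]
    simp only [List.map_cons, List.zipWith_cons_cons]
    rw [show (pvComb l (j + 1) :: List.map (pvComb l) (List.range' (j + 2) n))
          = List.map (pvComb l) (List.range' (j + 1) (n + 1)) from by rw [h2]; rfl]
    rw [ih (j + 1) l x]
    rfl

theorem pvStep_row (n : Nat) (l : List Int) (x : Int) :
    pvStep x ((List.range' 0 (n + 1)).map (pvComb l)) = (List.range' 0 (n + 1)).map (pvComb (x :: l)) := by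
  have h0 : List.range' 0 (n + 1) = 0 :: List.range' 1 n := by simp [List.range'_succ]
  rw [h0]
  simp only [List.map_cons, pvStep]
  have h := pvStep_zip n 0 l x
  rw [h0] at h
  simp only [List.map_cons, Nat.zero_add] at h
  rw [h, pvComb_zero l, pvComb_zero (x :: l)]

theorem foldr_rows (kn : Nat) : ∀ (items : List Int),
    items.foldr pvStep ((List.range' 0 (kn + 1)).map (pvComb [])) = (List.range' 0 (kn + 1)).map (pvComb items) := by
  intro items
  induction items with
  | nil => rfl
  | cons x r ih =>
    simp only [List.foldr_cons, ih, pvStep_row]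

theorem dp0_eq (kn : Nat) :
    ([[]] :: (List.range kn).map (fun _ => ([] : List (List Int)))) = (List.range' 0 (kn + 1)).map (pvComb []) := by
  have h0 : List.range' 0 (kn + 1) = 0 :: List.range' 1 kn := by simp [List.range'_succ]
  rw [h0, List.map_cons]
  congr 1
  apply List.ext_getElem
  · simp
  · intro i h1 h2
    simp only [List.getElem_map, List.getElem_range']
    have h : 1 + 1 * i = i + 1 := by ring
    rw [h]; rfl

theorem row_getD (kn : Nat) (items : List Int) :
    ((List.range' 0 (kn + 1)).map (pvComb items)).getD kn [] = pvComb items kn := by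
  have hlen : kn < ((List.range' 0 (kn + 1)).map (pvComb items)).length := by simp
  rw [List.getD_eq_getElem _ _ hlen]
  simp

-- ===== VERDICT (by name: the statement is the Claim_ definition above) =====
theorem subsets_of_size_py_spec : Claim_equal_subsets_of_size_py := by
  intro items k _
  unfold Spec_subsets_of_size_py subsets_of_size_py_alt
  by_cases hneg : k < 0
  · rw [if_pos (Or.inl hneg)]
    exact A_neg items k hneg
  · rw [not_lt] at hneg
    by_cases hgt : k > (Int.ofNat items.length)
    · rw [if_pos (Or.inr hgt)]
      rw [A_eq_comb items k hneg]
      exact pvComb_nil_of_gt items k.toNat (by simp at hgt ⊢; omega)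
    · rw [if_neg (by simp only [Int.ofNat_eq_natCast] at hgt ⊢; omega)]
      simp only
      rw [dp0_eq k.toNat, foldr_rows k.toNat items, row_getD k.toNat items]
      exact A_eq_comb items k hneg
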